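-- pv_equiv track=rewrite | github.com/baidinvladislav/cracking-interview | Yandex Interview (important)/test_problem9.py | solution
-- ===== SOURCE A (Python) =====
-- def solution(str1, str2):
--     stack = []
--     p1 = p2 = 0
--     counter = max(len(str1), len(str2))
--     while counter:
--         if p1 < len(str1):
--             stack.append(str1[p1])
--             p1 += 1
--
--         if p2 < len(str2):
--             stack.append(str2[p2])
--             p2 += 1
--
--         if len(stack) > 1:
--             if stack[-2] == stack[-1]:
--                 stack.pop(-2)
--                 stack.pop(-1)
--
--         counter -= 1
--
--     return len(stack) <= 2
-- ===== SOURCE B (Python) =====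
-- def _push(runs, c):
--     # push one char onto a run-length-encoded stack (top run last)
--     if runs and runs[-1][0] == c:
--         runs[-1] = (c, runs[-1][1] + 1)
--     else:
--         runs.append((c, 1))
--
--
-- def solution(str1, str2):
--     # The stack is kept run-length encoded as (char, multiplicity) runs,
--     # together with a running size counter; the answer is read off the counter.
--     runs = []
--     size = 0
--     # aligned phase: an aligned pair contributes both chars iff they differ
--     for a, b in zip(str1, str2):
--         if a != b:
--             _push(runs, a)
--             _push(runs, b)
--             size += 2
--     # leftover of the longer string, reduced against the encoded stack
--     shorter = min(len(str1), len(str2))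
--     for c in (str1 if len(str1) > len(str2) else str2)[shorter:]:
--         if runs and runs[-1][0] == c:
--             ch, k = runs[-1]
--             if k > 1:
--                 runs[-1] = (ch, k - 1)
--             else:
--                 runs.pop()
--             size -= 1
--         else:
--             _push(runs, c)
--             size += 1
--     return size <= 2
-- ===== Notes on version B (the rewrite author's own statement) =====
-- stated objective: alternative
-- what changed: A's char stack driven by a counter/pointer while-loop is replaced by a run-length-encoded stack of (char, multiplicity) runs plus a separately maintained size counter: an aligned zip pass keeps only unequal pairs, then the leftover of the longer string is reduced against the encoded runs, and the answer is read off the counter without ever materializing the char stack.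
import Mathlib
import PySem

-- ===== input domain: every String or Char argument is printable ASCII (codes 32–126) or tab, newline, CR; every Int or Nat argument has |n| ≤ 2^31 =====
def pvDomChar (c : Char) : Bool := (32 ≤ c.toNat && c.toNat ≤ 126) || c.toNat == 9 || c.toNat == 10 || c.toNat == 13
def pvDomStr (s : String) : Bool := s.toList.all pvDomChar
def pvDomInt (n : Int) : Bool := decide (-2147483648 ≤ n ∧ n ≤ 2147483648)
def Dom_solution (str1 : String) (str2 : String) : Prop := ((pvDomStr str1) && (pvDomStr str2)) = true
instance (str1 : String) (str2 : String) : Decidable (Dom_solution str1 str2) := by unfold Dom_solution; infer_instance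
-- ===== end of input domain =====

-- B replaces A's char stack and counter/pointer while-loop by a run-length-encoded stack of
-- (char, multiplicity) runs plus a size counter the answer is read from (objective: alternative).

-- ===== PORT A =====
-- The Python stack grows at its end; the port keeps the TOP AT THE HEAD
-- (append → cons, stack[-1] → head, the two pops → dropping two heads).
def solutionLoop (s1 s2 : List Char) : Nat → Nat → Nat → List Char → List Char
  | 0, _, _, stack => stack
  | counter+1, p1, p2, stack =>
    let (stack1, q1) := if p1 < s1.length then (s1[p1]! :: stack, p1+1) else (stack, p1)
    let (stack2, q2) := if p2 < s2.length then (s2[p2]! :: stack1, p2+1) else (stack1, p2)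
    let stack3 := match stack2 with
      | a :: b :: rest => if b == a then rest else a :: b :: rest
      | st => st
    solutionLoop s1 s2 counter q1 q2 stack3

def solution (str1 : String) (str2 : String) : Bool :=
  let s1 := str1.toList
  let s2 := str2.toList
  decide ((solutionLoop s1 s2 (max s1.length s2.length) 0 0 []).length ≤ 2)

-- ===== PORT B =====
-- The Python run list grows at its end; the port keeps the TOP RUN AT THE HEAD
-- (runs[-1] → head, append → cons, runs.pop() → dropping the head).
def pushRun : List (Char × Nat) → Char → List (Char × Nat)
  | (d, k) :: rest, c => if d == c then (c, k + 1) :: rest else (c, 1) :: (d, k) :: rest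
  | [], c => [(c, 1)]

def zipStepR (st : List (Char × Nat) × Nat) (ab : Char × Char) : List (Char × Nat) × Nat :=
  if ab.1 != ab.2 then (pushRun (pushRun st.1 ab.1) ab.2, st.2 + 2) else st

def tailStepR (st : List (Char × Nat) × Nat) (c : Char) : List (Char × Nat) × Nat :=
  match st.1 with
  | (d, k) :: rest =>
    if d == c then ((if k > 1 then (d, k - 1) :: rest else rest), st.2 - 1)
    else (pushRun st.1 c, st.2 + 1)
  | [] => (pushRun st.1 c, st.2 + 1)

def solution_alt (str1 : String) (str2 : String) : Bool :=
  let s1 := str1.toList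
  let s2 := str2.toList
  let st := (s1.zip s2).foldl zipStepR ([], 0)
  -- the slice (… if len(str1) > len(str2) else …)[min(len1,len2):] is exactly this drop
  let tl := (if s2.length < s1.length then s1 else s2).drop (min s1.length s2.length)
  decide ((tl.foldl tailStepR st).2 ≤ 2)

-- ===== PRECONDITION & SPEC =====
def Spec_solution (str1 : String) (str2 : String) (out : Bool) : Prop := out = solution_alt str1 str2
instance (str1 : String) (str2 : String) (out : Bool) : Decidable (Spec_solution str1 str2 out) := by unfold Spec_solution; infer_instance

-- ===== CLAIM (what is proved, stated in full; the proofs are below) =====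
def Claim_equal_solution : Prop := ∀ (str1 : String) (str2 : String), Dom_solution str1 str2 → Spec_solution str1 str2 (solution str1 str2)

-- ===== LEMMAS AND PROOFS =====

-- Ghost plain-stack versions of B's two passes (proof intermediary between A's loop and B's runs)
def zipStep (stack : List Char) (ab : Char × Char) : List Char :=
  if ab.1 != ab.2 then ab.2 :: ab.1 :: stack else stack

def tailStep (stack : List Char) (c : Char) : List Char :=
  match stack with
  | t :: rest => if t == c then rest else c :: t :: rest
  | [] => [c]

def flatten (runs : List (Char × Nat)) : List Char :=
  runs.flatMap (fun r => List.replicate r.2 r.1)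

-- the simulation relation between B's encoded state and a plain char stack
def StRel (st : List (Char × Nat) × Nat) (s : List Char) : Prop :=
  flatten st.1 = s ∧ (∀ r ∈ st.1, 1 ≤ r.2) ∧ st.2 = s.length

theorem flatten_pushRun (runs : List (Char × Nat)) (c : Char) :
    flatten (pushRun runs c) = c :: flatten runs := by
  cases runs with
  | nil => simp [pushRun, flatten]
  | cons r rest =>
    obtain ⟨d, k⟩ := r
    by_cases h : d = c
    · subst h; simp [pushRun, flatten, List.replicate_succ]
    · simp [pushRun, flatten, h]

theorem inv_pushRun (runs : List (Char × Nat)) (c : Char)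
    (h : ∀ r ∈ runs, 1 ≤ r.2) : ∀ r ∈ pushRun runs c, 1 ≤ r.2 := by
  intro x hx
  cases runs with
  | nil =>
    simp only [pushRun, List.mem_singleton] at hx
    subst hx; exact le_refl 1
  | cons r rest =>
    obtain ⟨d, k⟩ := r
    simp only [pushRun] at hx
    split_ifs at hx with hdc
    · rcases List.mem_cons.1 hx with h1 | h1
      · subst h1; exact Nat.succ_le_succ (Nat.zero_le _)
      · exact h x (List.mem_cons_of_mem _ h1)
    · rcases List.mem_cons.1 hx with h1 | h1
      · subst h1; exact le_refl 1
      · exact h x h1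

theorem zipStepR_rel (st : List (Char × Nat) × Nat) (s : List Char) (ab : Char × Char)
    (h : StRel st s) : StRel (zipStepR st ab) (zipStep s ab) := by
  obtain ⟨hf, hinv, hn⟩ := h
  by_cases hab : ab.1 = ab.2
  · have hb : (ab.1 != ab.2) = false := by simp [hab]
    simp only [zipStepR, zipStep, hb, Bool.false_eq_true, if_false]
    exact ⟨hf, hinv, hn⟩
  · have hb : (ab.1 != ab.2) = true := by simp [hab]
    simp only [zipStepR, zipStep, hb, if_true]
    refine ⟨?_, inv_pushRun _ _ (inv_pushRun _ _ hinv), ?_⟩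
    · rw [flatten_pushRun, flatten_pushRun, hf]
    · simp only [List.length_cons]; omega

theorem tailStepR_rel (st : List (Char × Nat) × Nat) (s : List Char) (c : Char)
    (h : StRel st s) : StRel (tailStepR st c) (tailStep s c) := by
  obtain ⟨hf, hinv, hn⟩ := h
  obtain ⟨runs, n⟩ := st
  cases runs with
  | nil =>
    simp only [flatten, List.flatMap_nil] at hf
    subst hf
    simp only [List.length_nil] at hn
    have e1 : tailStepR ([], n) c = ([(c, 1)], n + 1) := by simp [tailStepR, pushRun]
    rw [e1]
    refine ⟨by simp [flatten, tailStep], ?_, by simp [tailStep]; omega⟩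
    intro x hx
    simp only [List.mem_singleton] at hx
    subst hx; exact le_refl 1
  | cons r rest =>
    obtain ⟨d, k⟩ := r
    have hk : 1 ≤ k := hinv (d, k) List.mem_cons_self
    obtain ⟨m, rfl⟩ : ∃ m, k = m + 1 := ⟨k - 1, by omega⟩
    have hfl : flatten ((d, m + 1) :: rest) = d :: (List.replicate m d ++ flatten rest) := by
      simp [flatten, List.replicate_succ]
    rw [hfl] at hf
    subst hf
    simp only [List.length_cons, List.length_append, List.length_replicate] at hn
    by_cases hdc : d = c
    · subst hdc
      have e1 : tailStepR ((d, m + 1) :: rest, n) d =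
          ((if m + 1 > 1 then (d, m) :: rest else rest), n - 1) := by
        simp [tailStepR]
      have e2 : tailStep (d :: (List.replicate m d ++ flatten rest)) d =
          List.replicate m d ++ flatten rest := by
        simp [tailStep]
      rw [e1, e2]
      refine ⟨?_, ?_, ?_⟩
      · cases m with
        | zero => simp [flatten]
        | succ m' =>
          rw [if_pos (by omega)]
          simp [flatten]
      · intro x hx
        cases m with
        | zero =>
          rw [if_neg (by omega)] at hx
          exact hinv x (List.mem_cons_of_mem _ hx)
        | succ m' =>
          rw [if_pos (by omega)] at hx
          rcases List.mem_cons.1 hx with h1 | h1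
          · subst h1; exact Nat.succ_le_succ (Nat.zero_le _)
          · exact hinv x (List.mem_cons_of_mem _ h1)
      · simp only [List.length_append, List.length_replicate]; omega
    · have e1 : tailStepR ((d, m + 1) :: rest, n) c = ((c, 1) :: (d, m + 1) :: rest, n + 1) := by
        simp [tailStepR, pushRun, hdc]
      have e2 : tailStep (d :: (List.replicate m d ++ flatten rest)) c =
          c :: d :: (List.replicate m d ++ flatten rest) := by
        simp [tailStep, hdc]
      rw [e1, e2]
      refine ⟨?_, ?_, ?_⟩
      · simp [flatten, List.replicate_succ]
      · intro x hx
        rcases List.mem_cons.1 hx with h1 | h1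
        · subst h1; exact le_refl 1
        · exact hinv x h1
      · simp only [List.length_cons, List.length_append, List.length_replicate]; omega

theorem foldl_rel {σ τ ι : Type} (R : σ → τ → Prop) (f : σ → ι → σ) (g : τ → ι → τ)
    (hstep : ∀ s t i, R s t → R (f s i) (g t i)) :
    ∀ (l : List ι) (s : σ) (t : τ), R s t → R (l.foldl f s) (l.foldl g t) := by
  intro l
  induction l with
  | nil => intro s t h; simpa using h
  | cons x xs ih =>
    intro s t h
    simp only [List.foldl_cons]
    exact ih _ _ (hstep s t x h)

-- ===== A-side characterisation: the counter loop equals the two plain passes =====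

-- tail phase, str1 longer: only str1 still pushes; each step is exactly tailStep
theorem loop_tail1 (s1 s2 : List Char) :
    ∀ n j stack, j + n = s1.length → s2.length ≤ j →
      solutionLoop s1 s2 n j s2.length stack = (s1.drop j).foldl tailStep stack := by
  intro n
  induction n with
  | zero =>
    intro j stack hn _
    have h : s1.drop j = [] := List.drop_eq_nil_of_le (by omega)
    rw [h, List.foldl_nil]; rfl
  | succ n ih =>
    intro j stack hn hj
    have hjl : j < s1.length := by omega
    rw [List.drop_eq_getElem_cons hjl, List.foldl_cons, ← ih (j+1) _ (by omega) (by omega)]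
    simp only [solutionLoop, if_pos hjl, lt_irrefl,
      List.getElem!_eq_getElem?_getD, List.getElem?_eq_getElem hjl]
    congr 1
    cases stack with
    | nil => simp [tailStep]
    | cons t rest => simp [tailStep]

-- tail phase, str2 longer
theorem loop_tail2 (s1 s2 : List Char) :
    ∀ n j stack, j + n = s2.length → s1.length ≤ j →
      solutionLoop s1 s2 n s1.length j stack = (s2.drop j).foldl tailStep stack := by
  intro n
  induction n with
  | zero =>
    intro j stack hn _
    have h : s2.drop j = [] := List.drop_eq_nil_of_le (by omega)
    rw [h, List.foldl_nil]; rfl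
  | succ n ih =>
    intro j stack hn hj
    have hjl : j < s2.length := by omega
    rw [List.drop_eq_getElem_cons hjl, List.foldl_cons, ← ih (j+1) _ (by omega) (by omega)]
    simp only [solutionLoop, if_pos hjl, lt_irrefl,
      List.getElem!_eq_getElem?_getD, List.getElem?_eq_getElem hjl]
    congr 1
    cases stack with
    | nil => simp [tailStep]
    | cons t rest => simp [tailStep]

-- common phase: from aligned pointers k the whole loop computes the two plain passes
theorem loop_common (s1 s2 : List Char) :
    ∀ n k stack, k + n = max s1.length s2.length → k ≤ s1.length → k ≤ s2.length →
      solutionLoop s1 s2 n k k stack =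
        (if s2.length < s1.length then s1.drop s2.length else s2.drop s1.length).foldl tailStep
          (((s1.drop k).zip (s2.drop k)).foldl zipStep stack) := by
  intro n
  induction n with
  | zero =>
    intro k stack hn h1 h2
    have e1 : k = s1.length := by omega
    have e2 : k = s2.length := by omega
    simp [solutionLoop, List.drop_eq_nil_of_le (le_of_eq e1.symm),
      List.drop_eq_nil_of_le (le_of_eq e2.symm), ← e1, ← e2]
  | succ n ih =>
    intro k stack hn h1 h2
    rcases lt_or_eq_of_le h1 with hk1 | hk1
    · rcases lt_or_eq_of_le h2 with hk2 | hk2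
      · rw [List.drop_eq_getElem_cons hk1, List.drop_eq_getElem_cons hk2, List.zip_cons_cons,
          List.foldl_cons, ← ih (k+1) _ (by omega) (by omega) (by omega)]
        simp only [solutionLoop, if_pos hk1, if_pos hk2,
          List.getElem!_eq_getElem?_getD, List.getElem?_eq_getElem hk1,
          List.getElem?_eq_getElem hk2]
        congr 1
        simp only [zipStep, bne_iff_ne]
        by_cases h : s1[k] = s2[k] <;> simp [h]
      · have hlt : s2.length < s1.length := by omega
        rw [if_pos hlt]
        subst hk2
        rw [List.drop_length, List.zip_nil_right, List.foldl_nil]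
        exact loop_tail1 s1 s2 (n+1) s2.length stack (by omega) (le_refl _)
    · have hnlt : ¬ s2.length < s1.length := by omega
      rw [if_neg hnlt]
      subst hk1
      rw [List.drop_length, List.zip_nil_left, List.foldl_nil]
      exact loop_tail2 s1 s2 (n+1) s1.length stack (by omega) (le_refl _)

-- B's tail slice coincides with the branch-per-string drop used on the A side
theorem tail_slice_eq (s1 s2 : List Char) :
    (if s2.length < s1.length then s1 else s2).drop (min s1.length s2.length) =
      if s2.length < s1.length then s1.drop s2.length else s2.drop s1.length := by
  split_ifs with h
  · rw [Nat.min_eq_right (le_of_lt h)]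
  · rw [Nat.min_eq_left (by omega)]

-- ===== VERDICT (by name: the statement is the Claim_ definition above) =====
theorem solution_spec : Claim_equal_solution := by
  intro str1 str2 _
  unfold Spec_solution solution solution_alt
  simp only []
  rw [loop_common str1.toList str2.toList (max str1.toList.length str2.toList.length) 0 []
    (by omega) (Nat.zero_le _) (Nat.zero_le _), tail_slice_eq]
  simp only [List.drop_zero]
  have h0 : StRel ([], 0) ([] : List Char) := ⟨rfl, by simp, rfl⟩
  have hz := foldl_rel StRel zipStepR zipStep zipStepR_rel
    (str1.toList.zip str2.toList) ([], 0) [] h0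
  have ht := foldl_rel StRel tailStepR tailStep tailStepR_rel
    (if str2.toList.length < str1.toList.length then str1.toList.drop str2.toList.length
     else str2.toList.drop str1.toList.length) _ _ hz
  rw [ht.2.2]
  rfl
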